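-- pv_equiv track=rewrite | github.com/razamu15/StripeInterview | python/logs_penalty/server_time_variant.py | find_best_removal_time
-- ===== SOURCE A (Python) =====
-- def compute_penalty(log, remove_at):
--     #computes the total penalty
--     log  = log.split(" ")
--     penalty = 0
--
--     for hour, server_state in enumerate(log):
--         if hour < remove_at:
--             penalty += 1 if server_state == '1' else 0
--         else: # hour >= remove_at:
--             penalty += 1 if server_state == '0' else 0
--
--     return penalty
--
-- def find_best_removal_time(log):
--     min_penalty = float('inf')
--     best_hour = None
--     for i in range(len(log)+1):
--         remove_at_cur_hour = compute_penalty(log, i)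
--         if remove_at_cur_hour < min_penalty:
--             min_penalty = remove_at_cur_hour
--             best_hour = i
--     return best_hour
-- ===== SOURCE B (Python) =====
-- def find_best_removal_time(log):
--     # O(total length): split once, then a single pass updating the running penalty.
--     # Removing at hour 0 costs the number of '0' tokens; moving the removal hour
--     # past token t adds 1 if t == '1' and subtracts 1 if t == '0'.
--     tokens = log.split(" ")
--     cur = tokens.count('0')
--     best_pen = cur
--     best = 0
--     for i, t in enumerate(tokens):
--         if t == '1':
--             cur += 1
--         elif t == '0':
--             cur -= 1
--         if cur < best_pen:
--             best_pen = cur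
--             best = i + 1
--     return best
-- ===== Notes on version B (the rewrite author's own statement) =====
-- stated objective: faster
-- what changed: B splits the log once and computes the best removal hour in a single pass, updating the running penalty incrementally (+1 past a '1' token, -1 past a '0' token) instead of re-splitting the string and rescanning all tokens for every candidate hour.
import Mathlib
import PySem

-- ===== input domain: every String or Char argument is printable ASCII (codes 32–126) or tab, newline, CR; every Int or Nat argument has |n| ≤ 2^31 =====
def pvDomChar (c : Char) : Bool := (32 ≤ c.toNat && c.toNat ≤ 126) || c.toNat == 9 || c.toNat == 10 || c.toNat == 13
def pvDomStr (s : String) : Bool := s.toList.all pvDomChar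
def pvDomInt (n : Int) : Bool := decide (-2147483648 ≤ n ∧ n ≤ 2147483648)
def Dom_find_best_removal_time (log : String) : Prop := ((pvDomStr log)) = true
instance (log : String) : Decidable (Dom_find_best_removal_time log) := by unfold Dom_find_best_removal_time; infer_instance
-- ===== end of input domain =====

-- B replaces A's quadratic rescan (compute_penalty re-splits the log and rescans every token for
-- each candidate hour) by one split and a single pass that updates the running penalty incrementally.

-- ===== PORT A =====
-- loop body of compute_penalty
def pyPenStep (remove_at : Int) (penalty : Int) (hs : Int × String) : Int :=
  if hs.1 < remove_at then penalty + (if hs.2 == "1" then 1 else 0)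
  else penalty + (if hs.2 == "0" then 1 else 0)

def compute_penalty (log : String) (remove_at : Int) : Int :=
  -- log.split(" "): sep is the non-empty " ", so split? is always `some`
  let log' := (PySem.Str.split? log " ").getD []
  (PySem.List.enumerate log').foldl (pyPenStep remove_at) 0

-- loop body of find_best_removal_time; state = (min_penalty, best_hour), none = float('inf') / None
def pyStepA (g : Int → Int) (st : Option Int × Option Int) (i : Int) : Option Int × Option Int :=
  let p := g i
  match st.1 with
  | none => (some p, some i)        -- p < float('inf') is always true
  | some m => if p < m then (some p, some i) else st

def find_best_removal_time (log : String) : Int :=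
  let st := (PySem.List.pyRange 0 (PySem.Str.len log + 1) 1).foldl
    (pyStepA (compute_penalty log)) (none, none)
  st.2.getD 0   -- the loop runs at least once, so best_hour is always set; 0 is unreachable

-- ===== PORT B =====
-- loop body; state = (cur, best_pen, best)
def pyStepB (st : Int × Int × Int) (it : Int × String) : Int × Int × Int :=
  let cur := if it.2 == "1" then st.1 + 1 else if it.2 == "0" then st.1 - 1 else st.1
  if cur < st.2.1 then (cur, cur, it.1 + 1) else (cur, st.2.1, st.2.2)

def find_best_removal_time_alt (log : String) : Int :=
  let tokens := (PySem.Str.split? log " ").getD []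
  let cur0 : Int := (PySem.List.count tokens "0" : Nat)
  let st := (PySem.List.enumerate tokens).foldl pyStepB (cur0, cur0, 0)
  st.2.2

-- ===== PRECONDITION & SPEC =====
def Spec_find_best_removal_time (log : String) (out : Int) : Prop := out = find_best_removal_time_alt log
instance (log : String) (out : Int) : Decidable (Spec_find_best_removal_time log out) := by unfold Spec_find_best_removal_time; infer_instance

-- ===== CLAIM (what is proved, stated in full; the proofs are below) =====
def Claim_equal_find_best_removal_time : Prop := ∀ (log : String), Dom_find_best_removal_time log → Spec_find_best_removal_time log (find_best_removal_time log)

-- ===== LEMMAS AND PROOFS =====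

-- the token list both programs work on
def pvToks (log : String) : List String := (PySem.Str.split? log " ").getD []

def pvOnes (l : List String) : Int := (l.map (fun t => if t == "1" then (1:Int) else 0)).sum
def pvZeros (l : List String) : Int := (l.map (fun t => if t == "0" then (1:Int) else 0)).sum

-- penalty for removing at hour r: ones before r plus zeros from r on
def pvPen (toks : List String) (r : Nat) : Int := pvOnes (toks.take r) + pvZeros (toks.drop r)

def pvDelta (t : String) : Int := if t == "1" then 1 else if t == "0" then -1 else 0

-- first-argmin scan over (index, value) pairs, state = (min, argmin)
def pvArg : List (Int × Int) → Int × Int → Int × Int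
  | [], s => s
  | p :: rest, s => pvArg rest (if p.2 < s.1 then (p.2, p.1) else s)

-- the (hour, running penalty) pairs B's loop examines
def pvPairs : List String → Nat → Int → List (Int × Int)
  | [], _, _ => []
  | t :: ts, s, cur => ((s:Int) + 1, cur + pvDelta t) :: pvPairs ts (s+1) (cur + pvDelta t)

lemma pen_fold (ts : List String) : ∀ (s r : Nat) (acc : Int),
    (PySem.List.enumerate ts (s:Int)).foldl (pyPenStep (r:Int)) acc
      = acc + pvOnes (ts.take (r - s)) + pvZeros (ts.drop (r - s)) := by
  induction ts with
  | nil => intro s r acc; simp [PySem.List.enumerate_nil, pvOnes, pvZeros]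
  | cons t ts ih =>
    intro s r acc
    rw [PySem.List.enumerate_cons]
    simp only [List.foldl_cons]
    have hcast : (s:Int) + 1 = ((s+1 : Nat) : Int) := by push_cast; ring
    rw [hcast, ih (s+1) r]
    by_cases h : s < r
    · have h1 : r - s = (r - (s+1)) + 1 := by omega
      have hlt : (s:Int) < (r:Int) := by exact_mod_cast h
      rw [h1]
      simp only [List.take_succ_cons, List.drop_succ_cons]
      simp [pyPenStep, hlt, pvOnes]
      ring
    · have h0 : r - s = 0 := by omega
      have h0' : r - (s+1) = 0 := by omega
      have hge : ¬ ((s:Int) < (r:Int)) := by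
        rw [not_lt]
        exact_mod_cast Nat.le_of_not_lt h
      rw [h0, h0']
      simp only [List.take_zero, List.drop_zero]
      simp [pyPenStep, hge, pvZeros]
      ring

lemma compute_penalty_eq (log : String) (r : Nat) :
    compute_penalty log (r : Int) = pvPen (pvToks log) r := by
  have := pen_fold (pvToks log) 0 r 0
  simpa [compute_penalty, pvToks, pvPen] using this

lemma zeros_eq_count (l : List String) : pvZeros l = (List.count "0" l : Int) := by
  induction l with
  | nil => simp [pvZeros]
  | cons t ts ih =>
    simp only [pvZeros, List.map_cons, List.sum_cons, List.count_cons] at ih ⊢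
    rw [ih]
    push_cast
    by_cases h : t == "0" <;> simp [h] <;> ring

lemma pen_zero (toks : List String) : pvPen toks 0 = pvZeros toks := by
  simp [pvPen, pvOnes]

lemma pen_succ (toks : List String) (r : Nat) (h : r < toks.length) :
    pvPen toks (r+1) = pvPen toks r + pvDelta toks[r] := by
  have htake : toks.take (r+1) = toks.take r ++ [toks[r]] := by
    rw [List.take_add_one]
    simp [List.getElem?_eq_getElem h]
  have hdrop : toks.drop r = toks[r] :: toks.drop (r+1) := List.drop_eq_getElem_cons h
  rw [pvPen, pvPen, htake, hdrop]
  simp only [pvOnes, pvZeros, List.map_append, List.sum_append, List.map_cons, List.sum_cons,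
    List.map_nil, List.sum_nil, pvDelta]
  by_cases h1 : toks[r] == "1"
  · have h0 : (toks[r] == "0") = false := by
      rw [beq_iff_eq] at h1; rw [beq_eq_false_iff_ne, h1]; decide
    simp [h1, h0] <;> ring
  · by_cases h0 : toks[r] == "0" <;> simp [h1, h0] <;> ring

lemma pen_ge (toks : List String) (r : Nat) (h : toks.length ≤ r) :
    pvPen toks r = pvOnes toks := by
  rw [pvPen, List.take_of_length_le h, List.drop_of_length_le h]
  simp [pvZeros]

lemma foldA_eq (g : Int → Int) : ∀ (is : List Int) (m b : Int),
    is.foldl (pyStepA g) (some m, some b)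
      = (some (pvArg (is.map fun i => (i, g i)) (m, b)).1,
         some (pvArg (is.map fun i => (i, g i)) (m, b)).2) := by
  intro is
  induction is with
  | nil => intro m b; simp [pvArg]
  | cons i is ih =>
    intro m b
    simp only [List.foldl_cons, List.map_cons, pvArg]
    by_cases h : g i < m
    · simpa [pyStepA, h] using ih (g i) i
    · simpa [pyStepA, h] using ih m b

lemma foldB_eq : ∀ (ts : List String) (s : Nat) (cur m b : Int),
    ((PySem.List.enumerate ts (s:Int)).foldl pyStepB (cur, m, b)).2
      = pvArg (pvPairs ts s cur) (m, b) := by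
  intro ts
  induction ts with
  | nil => intro s cur m b; simp [PySem.List.enumerate_nil, pvPairs, pvArg]
  | cons t ts ih =>
    intro s cur m b
    rw [PySem.List.enumerate_cons]
    simp only [List.foldl_cons, pvPairs, pvArg]
    have hcast : (s:Int) + 1 = ((s+1 : Nat) : Int) := by push_cast; ring
    have hcur : (if t == "1" then cur + 1 else if t == "0" then cur - 1 else cur)
        = cur + pvDelta t := by
      unfold pvDelta
      by_cases h1 : t == "1" <;> by_cases h0 : t == "0" <;> simp [h1, h0] <;> ring
    by_cases h : cur + pvDelta t < m
    · have := ih (s+1) (cur + pvDelta t) (cur + pvDelta t) ((s:Int)+1)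
      simp only [pyStepB, hcur, if_pos h, hcast] at *
      simpa [h] using this
    · have := ih (s+1) (cur + pvDelta t) m b
      simp only [pyStepB, hcur, if_neg h, hcast] at *
      simpa [h] using this

lemma pairs_eq (toks : List String) : ∀ (ts : List String) (s : Nat),
    toks.drop s = ts →
    pvPairs ts s (pvPen toks s)
      = (List.range ts.length).map (fun k => (((s+k+1 : Nat) : Int), pvPen toks (s+k+1))) := by
  intro ts
  induction ts with
  | nil => intro s _; simp [pvPairs]
  | cons t ts ih =>
    intro s hdrop
    have hs : s < toks.length := by
      by_contra h
      rw [List.drop_of_length_le (Nat.le_of_not_lt h)] at hdrop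
      simp at hdrop
    have hcons : toks.drop s = toks[s] :: toks.drop (s+1) := List.drop_eq_getElem_cons hs
    rw [hdrop] at hcons
    obtain ⟨hget, hdrop'⟩ := List.cons.inj hcons
    have hstep : pvPen toks s + pvDelta t = pvPen toks (s+1) := by
      rw [pen_succ toks s hs, ← hget]
    rw [pvPairs, hstep, ih (s+1) hdrop'.symm, List.length_cons, List.range_succ_eq_map,
      List.map_cons, List.map_map]
    refine congrArg₂ List.cons ?_ ?_
    · norm_num
    · refine List.map_congr_left (fun k _ => ?_)
      simp only [Function.comp_apply]
      rw [show s + 1 + k + 1 = s + (k + 1) + 1 from by omega]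

lemma pvArg_append : ∀ (l e : List (Int × Int)) (s : Int × Int),
    pvArg (l ++ e) s = pvArg e (pvArg l s) := by
  intro l
  induction l with
  | nil => intro e s; simp [pvArg]
  | cons p l ih => intro e s; simp only [List.cons_append, pvArg]; exact ih e _

lemma pvArg_min_le : ∀ (l : List (Int × Int)) (s : Int × Int),
    (pvArg l s).1 ≤ s.1 ∧ ∀ p ∈ l, (pvArg l s).1 ≤ p.2 := by
  intro l
  induction l with
  | nil => intro s; exact ⟨le_refl _, by simp⟩
  | cons q l ih =>
    intro s
    simp only [pvArg]
    by_cases h : q.2 < s.1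
    · rw [if_pos h]
      refine ⟨le_of_lt (lt_of_le_of_lt (ih (q.2, q.1)).1 h), ?_⟩
      intro p hp
      rcases List.mem_cons.mp hp with rfl | hp
      · exact (ih (p.2, p.1)).1
      · exact (ih (q.2, q.1)).2 p hp
    · rw [if_neg h]
      rw [not_lt] at h
      refine ⟨(ih s).1, ?_⟩
      intro p hp
      rcases List.mem_cons.mp hp with rfl | hp
      · exact le_trans (ih s).1 h
      · exact (ih s).2 p hp

lemma pvArg_no_update : ∀ (l : List (Int × Int)) (s : Int × Int),
    (∀ p ∈ l, s.1 ≤ p.2) → pvArg l s = s := by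
  intro l
  induction l with
  | nil => intro s _; rfl
  | cons q l ih =>
    intro s h
    have hq : s.1 ≤ q.2 := h q (List.mem_cons_self ..)
    simp only [pvArg, if_neg (not_lt.mpr hq)]
    exact ih s (fun p hp => h p (List.mem_cons_of_mem _ hp))

lemma go_length : ∀ (fuel : Nat) (l cur : List Char) (acc : List (List Char))
    (_ : l.length < fuel),
    (PySem.Chars.splitOn.go [' '] fuel l cur acc).length = acc.length + 1 + l.count ' ' := by
  intro fuel
  induction fuel with
  | zero => intro l cur acc h; omega
  | succ f ih =>
    intro l cur acc h
    cases l with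
    | nil =>
      show ((cur.reverse :: acc).reverse).length = _
      simp
    | cons c rest =>
      by_cases hc : c = ' '
      · subst hc
        have h1 : PySem.Chars.splitOn.go [' '] (f+1) (' ' :: rest) cur acc
            = PySem.Chars.splitOn.go [' '] f (List.drop 1 (' ' :: rest)) [] (cur.reverse :: acc) := by
          show (if [' '].isPrefixOf (' ' :: rest) then _ else _) = _
          simp [List.isPrefixOf]
        rw [h1]
        simp only [List.drop_succ_cons, List.drop_zero]
        rw [ih rest [] (cur.reverse :: acc) (by simpa using Nat.lt_of_succ_lt_succ h)]
        simp
        omega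
      · have h1 : PySem.Chars.splitOn.go [' '] (f+1) (c :: rest) cur acc
            = PySem.Chars.splitOn.go [' '] f rest (c :: cur) acc := by
          show (if [' '].isPrefixOf (c :: rest) then _ else _) = _
          simp [List.isPrefixOf, Ne.symm hc]
        rw [h1, ih rest (c :: cur) acc (by simpa using Nat.lt_of_succ_lt_succ h)]
        simp [hc]

lemma go_all_space : ∀ (fuel : Nat) (l : List Char) (acc : List (List Char))
    (_ : l.length < fuel) (_ : ∀ c ∈ l, c = ' '),
    PySem.Chars.splitOn.go [' '] fuel l [] acc
      = acc.reverse ++ List.replicate (l.length + 1) [] := by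
  intro fuel
  induction fuel with
  | zero => intro l acc h _; omega
  | succ f ih =>
    intro l acc h hall
    cases l with
    | nil =>
      show ((List.reverse [] :: acc).reverse) = _
      simp
    | cons c rest =>
      have hc : c = ' ' := hall c (List.mem_cons_self ..)
      subst hc
      have h1 : PySem.Chars.splitOn.go [' '] (f+1) (' ' :: rest) [] acc
          = PySem.Chars.splitOn.go [' '] f (List.drop 1 (' ' :: rest)) [] (List.reverse [] :: acc) := by
        show (if [' '].isPrefixOf (' ' :: rest) then _ else _) = _
        simp [List.isPrefixOf]
      rw [h1]
      simp only [List.drop_succ_cons, List.drop_zero, List.reverse_nil]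
      rw [ih rest ([] :: acc) (by simpa using Nat.lt_of_succ_lt_succ h)
        (fun c hc => hall c (List.mem_cons_of_mem _ hc))]
      simp [List.replicate_succ]

lemma toks_eq (log : String) :
    pvToks log = (PySem.Chars.splitOn log.toList [' ']).map String.ofList := by
  simp [pvToks, PySem.Str.split?, PySem.Chars.split?]

lemma toks_length (log : String) :
    (pvToks log).length = log.toList.count ' ' + 1 := by
  rw [toks_eq, List.length_map]
  show (PySem.Chars.splitOn.go [' '] (log.toList.length + 1) log.toList [] []).length = _
  rw [go_length _ _ _ _ (Nat.lt_succ_self _)]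
  simp only [List.length_nil]
  omega

lemma toks_all_space (log : String) (h : log.toList.count ' ' = log.toList.length) :
    pvToks log = List.replicate (log.toList.length + 1) "" := by
  have hall : ∀ c ∈ log.toList, c = ' ' :=
    fun c hc => (List.count_eq_length.mp h c hc).symm
  rw [toks_eq]
  show (PySem.Chars.splitOn.go [' '] (log.toList.length + 1) log.toList [] []).map String.ofList = _
  rw [go_all_space _ _ _ (Nat.lt_succ_self _) hall]
  simp [List.map_replicate]

lemma str_len_eq (log : String) : PySem.Str.len log = (log.toList.length : Int) := by
  simp

lemma A_eq (log : String) :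
    find_best_removal_time log
      = (pvArg ((List.range log.toList.length).map
          (fun k => (((k+1 : Nat) : Int), pvPen (pvToks log) (k+1))))
          (pvPen (pvToks log) 0, 0)).2 := by
  simp only [find_best_removal_time]
  rw [str_len_eq]
  have h0 : (0:Int) < (log.toList.length : Int) + 1 := by positivity
  rw [PySem.List.pyRange_one_cons h0]
  simp only [List.foldl_cons]
  have hstep0 : pyStepA (compute_penalty log) (none, none) 0
      = (some (compute_penalty log 0), some 0) := rfl
  rw [hstep0, foldA_eq]
  simp only [Option.getD_some]
  have hlist : (PySem.List.pyRange (0+1) ((log.toList.length : Int) + 1)).map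
        (fun i => (i, compute_penalty log i))
      = (List.range log.toList.length).map
          (fun k => (((k+1 : Nat) : Int), pvPen (pvToks log) (k+1))) := by
    rw [PySem.List.pyRange_one]
    rw [List.map_map]
    have hnat : (((log.toList.length : Int) + 1) - (0+1)).toNat = log.toList.length := by omega
    rw [hnat]
    refine List.map_congr_left (fun k _ => ?_)
    simp only [Function.comp_apply]
    have hcast : (0:Int) + 1 + (k:Int) = ((k+1 : Nat) : Int) := by push_cast; ring
    rw [hcast, compute_penalty_eq]
  have hinit : compute_penalty log 0 = pvPen (pvToks log) 0 := by
    have := compute_penalty_eq log 0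
    simpa using this
  rw [hlist, hinit]

lemma B_eq (log : String) :
    find_best_removal_time_alt log
      = (pvArg ((List.range (pvToks log).length).map
          (fun k => (((k+1 : Nat) : Int), pvPen (pvToks log) (k+1))))
          (pvPen (pvToks log) 0, 0)).2 := by
  simp only [find_best_removal_time_alt]
  have hc0 : ((PySem.List.count (pvToks log) "0" : Nat) : Int) = pvPen (pvToks log) 0 := by
    rw [pen_zero, zeros_eq_count, PySem.List.count_eq]
  have henum : ((PySem.List.enumerate (pvToks log) ((0:Nat):Int)).foldl pyStepB
        (pvPen (pvToks log) 0, pvPen (pvToks log) 0, 0)).2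
      = pvArg (pvPairs (pvToks log) 0 (pvPen (pvToks log) 0)) (pvPen (pvToks log) 0, 0) :=
    foldB_eq (pvToks log) 0 _ _ _
  have hpairs : pvPairs (pvToks log) 0 (pvPen (pvToks log) 0)
      = (List.range (pvToks log).length).map
          (fun k => (((k+1 : Nat) : Int), pvPen (pvToks log) (k+1))) := by
    rw [pairs_eq (pvToks log) (pvToks log) 0 (by simp)]
    refine List.map_congr_left (fun k _ => ?_)
    rw [show 0 + k + 1 = k + 1 from by omega]
  rw [show ((0:Nat):Int) = (0:Int) from rfl] at henum
  rw [hpairs] at henum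
  rw [show (PySem.Str.split? log " ").getD [] = pvToks log from rfl, hc0]
  exact congrArg Prod.snd henum

lemma main_eq (log : String) :
    find_best_removal_time log = find_best_removal_time_alt log := by
  rw [A_eq, B_eq]
  have hn : (pvToks log).length = log.toList.count ' ' + 1 := toks_length log
  by_cases hc : log.toList.count ' ' = log.toList.length
  · -- all characters are spaces: every token is "", the penalty is identically 0,
    -- and both scans keep best = 0
    have htoks : pvToks log = List.replicate (log.toList.length + 1) "" := toks_all_space log hc
    have hpen : ∀ r : Nat, pvPen (pvToks log) r = 0 := by
      intro r
      rw [htoks]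
      simp [pvPen, pvOnes, pvZeros, List.take_replicate, List.drop_replicate,
        List.map_replicate, List.sum_replicate]
    have hA : ∀ p ∈ (List.range log.toList.length).map
        (fun k => (((k+1 : Nat) : Int), pvPen (pvToks log) (k+1))),
        (pvPen (pvToks log) 0, (0:Int)).1 ≤ p.2 := by
      intro p hp
      obtain ⟨k, _, rfl⟩ := List.mem_map.mp hp
      simp [hpen]
    have hB : ∀ p ∈ (List.range (pvToks log).length).map
        (fun k => (((k+1 : Nat) : Int), pvPen (pvToks log) (k+1))),
        (pvPen (pvToks log) 0, (0:Int)).1 ≤ p.2 := by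
      intro p hp
      obtain ⟨k, _, rfl⟩ := List.mem_map.mp hp
      simp [hpen]
    rw [pvArg_no_update _ _ hA, pvArg_no_update _ _ hB]
  · -- at least one non-space: #tokens ≤ len(log); A's extra hours all cost pvOnes toks,
    -- which the B scan has already seen, so they never update the state
    have hcle : log.toList.count ' ' ≤ log.toList.length := List.count_le_length
    have hnL : (pvToks log).length ≤ log.toList.length := by omega
    have hsplit : List.range log.toList.length
        = List.range (pvToks log).length
          ++ (List.range (log.toList.length - (pvToks log).length)).map
              (fun j => (pvToks log).length + j) := by
      conv_lhs => rw [show log.toList.length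
        = (pvToks log).length + (log.toList.length - (pvToks log).length) from by omega]
      exact List.range_add
    rw [hsplit, List.map_append, pvArg_append]
    have hmin : (pvArg ((List.range (pvToks log).length).map
          (fun k => (((k+1 : Nat) : Int), pvPen (pvToks log) (k+1))))
          (pvPen (pvToks log) 0, 0)).1 ≤ pvOnes (pvToks log) := by
      have hmem : ((((pvToks log).length - 1 + 1 : Nat) : Int),
          pvPen (pvToks log) ((pvToks log).length - 1 + 1))
          ∈ (List.range (pvToks log).length).map
            (fun k => (((k+1 : Nat) : Int), pvPen (pvToks log) (k+1))) :=
        List.mem_map.mpr ⟨(pvToks log).length - 1, List.mem_range.mpr (by omega), rfl⟩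
      have := (pvArg_min_le _ (pvPen (pvToks log) 0, 0)).2 _ hmem
      rwa [show (pvToks log).length - 1 + 1 = (pvToks log).length from by omega,
        pen_ge _ _ (le_refl _)] at this
    have hext : ∀ p ∈ ((List.range (log.toList.length - (pvToks log).length)).map
          (fun j => (pvToks log).length + j)).map
          (fun k => (((k+1 : Nat) : Int), pvPen (pvToks log) (k+1))),
        (pvArg ((List.range (pvToks log).length).map
          (fun k => (((k+1 : Nat) : Int), pvPen (pvToks log) (k+1))))
          (pvPen (pvToks log) 0, 0)).1 ≤ p.2 := by
      intro p hp
      obtain ⟨k, hk, rfl⟩ := List.mem_map.mp hp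
      obtain ⟨j, _, rfl⟩ := List.mem_map.mp hk
      have : pvPen (pvToks log) ((pvToks log).length + j + 1) = pvOnes (pvToks log) :=
        pen_ge _ _ (by omega)
      simpa [this] using hmin
    rw [pvArg_no_update _ _ hext]

-- ===== VERDICT (by name: the statement is the Claim_ definition above) =====
theorem find_best_removal_time_spec : Claim_equal_find_best_removal_time := by
  intro log _
  unfold Spec_find_best_removal_time
  exact main_eq log
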